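-- pv_equiv track=rewrite | github.com/luminaa/CSCI-135 | Class Works/Covid File Reading/ans.py | get_users_comments_from_chunks
-- ===== SOURCE A (Python) =====
-- def get_users_comments_from_chunks(chunks):
--     dic = {}
--     users_with_multiple_posts = set()
--     users = set()
--
--     for chunk in chunks:
--         # Skip empty chunks
--         if not chunk:
--             continue
--
--         # Extract the username of the user who wrote the chunk
--         username = chunk[1]
--
--         # If the user has already posted a comment before, add them to the set of users with multiple comments
--         if username in dic:
--             users_with_multiple_posts.add(username)
--
--         # Add the user to the set of all users who posted comments
--         users.add(username)
--
--         # Extract the content of the chunk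
--         i = 5
--         text = ""
--
--         while i < len(chunk) and not chunk[i].startswith('Reply'):
--             text += chunk[i]
--             i += 1
--
--         # Add the user's comment to the dictionary of comments
--         if username not in dic:
--             dic[username] = []
--         dic[username].append(text)
--
--     return dic, users, users_with_multiple_posts
-- ===== SOURCE B (Python) =====
-- def _comment_text(chunk):
--     # join the body parts after the 5 header lines, up to the first 'Reply' marker
--     body = chunk[5:]
--     for i, part in enumerate(body):
--         if part.startswith('Reply'):
--             return ''.join(body[:i])
--     return ''.join(body)
--
--
-- def get_users_comments_from_chunks(chunks):
--     # staged passes: parse records, then derive everything from the name list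
--     records = [c for c in chunks if c]
--     names = [c[1] for c in records]
--
--     # first-occurrence order of the distinct usernames
--     order = list(dict.fromkeys(names))
--
--     # per-user pass: gather each user's comment texts in chunk order
--     dic = {u: [_comment_text(c) for c in records if c[1] == u] for u in order}
--
--     users = set(names)
--     # a name is a repeat exactly when it already occurred in a strictly earlier record
--     dups = [n for i, n in enumerate(names) if n in names[:i]]
--     users_with_multiple_posts = set(dups)
--
--     return dic, users, users_with_multiple_posts
-- ===== Notes on version B (the rewrite author's own statement) =====
-- stated objective: alternative
-- what changed: B replaces A's single incremental pass (mutating dict and two sets per chunk) by staged derivations from the list of usernames: an ordered dedup gives the key order, a per-user filter pass builds each comment group, users is set(names), and the multiple-posters set is derived from prefix membership in the name list.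
-- outside the precondition, e.g. on get_users_comments_from_chunks([['c']]): A raises IndexError, B raises IndexError
import Mathlib
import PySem

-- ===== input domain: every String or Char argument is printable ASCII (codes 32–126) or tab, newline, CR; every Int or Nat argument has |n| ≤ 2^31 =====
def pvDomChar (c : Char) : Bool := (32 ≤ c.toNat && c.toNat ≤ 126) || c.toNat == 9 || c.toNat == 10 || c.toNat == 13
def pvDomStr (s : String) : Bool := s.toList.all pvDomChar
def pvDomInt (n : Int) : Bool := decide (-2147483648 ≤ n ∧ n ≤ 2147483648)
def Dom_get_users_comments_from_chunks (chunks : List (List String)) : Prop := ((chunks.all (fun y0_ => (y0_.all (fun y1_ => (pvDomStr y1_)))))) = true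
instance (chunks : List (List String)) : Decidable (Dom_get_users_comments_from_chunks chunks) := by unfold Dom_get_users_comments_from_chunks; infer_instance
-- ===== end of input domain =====

-- B derives everything in staged passes from the list of usernames (ordered dedup for key order,
-- a per-user filter pass per comment group, prefix membership for the multiple-posters set)
-- instead of A's single incremental pass; objective: alternative.

-- ===== PORT A =====
-- the while loop 'while i < len(chunk) and not chunk[i].startswith("Reply"): text += chunk[i]; i += 1'
def pvTextA (chunk : List String) (i : Nat) (text : String) : String :=
  if h : i < chunk.length then
    if PySem.Str.startswith chunk[i] "Reply" then text
    else pvTextA chunk (i + 1) (text ++ chunk[i])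
  else text
termination_by chunk.length - i

-- one iteration of A's 'for chunk in chunks' loop over the state (dic, users, users_with_multiple_posts)
def pvStepA (st : PySem.Dict String (List String) × PySem.Set String × PySem.Set String)
    (chunk : List String) : PySem.Dict String (List String) × PySem.Set String × PySem.Set String :=
  if chunk = [] then st
  else
    let dic := st.1
    let users := st.2.1
    let multi := st.2.2
    let username := PySem.List.pyGetD chunk 1 ""
    let multi := if dic.contains username then PySem.Set.add multi username else multi
    let users := PySem.Set.add users username
    let text := pvTextA chunk 5 ""
    let dic := if dic.contains username then dic else dic.insert username []
    let dic := dic.modify username [] (· ++ [text])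
    (dic, users, multi)

def get_users_comments_from_chunks (chunks : List (List String)) :
    (List (String × List String)) × List String × List String :=
  let st := chunks.foldl pvStepA (PySem.Dict.empty, PySem.Set.empty, PySem.Set.empty)
  (st.1.items, st.2.1, st.2.2)

-- ===== PORT B =====
-- _comment_text's 'for i, part in enumerate(body): if part.startswith("Reply"): return "".join(body[:i])'
-- collects exactly the prefix of the body before the first 'Reply' part
def pvBodyB (parts : List String) : List String :=
  match parts with
  | [] => []
  | p :: rest => if PySem.Str.startswith p "Reply" then [] else p :: pvBodyB rest

def pvCommentTextB (chunk : List String) : String :=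
  PySem.Str.join "" (pvBodyB (PySem.List.slice chunk (some 5) none))

-- '[n for i, n in enumerate(names) if n in names[:i]]'
def pvDups (names : List String) : List String :=
  (PySem.List.enumerate names 0).filterMap
    (fun p => if (PySem.List.slice names none (some p.1)).contains p.2 then some p.2 else none)

def get_users_comments_from_chunks_alt (chunks : List (List String)) :
    (List (String × List String)) × List String × List String :=
  let records := chunks.filter (fun c => !c.isEmpty)
  let names := records.map (fun c => PySem.List.pyGetD c 1 "")
  let order := PySem.List.dedup names
  let dic := PySem.Dict.ofList (order.map (fun u =>
    (u, (records.filter (fun c => PySem.List.pyGetD c 1 "" == u)).map pvCommentTextB)))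
  (dic.items, PySem.Set.ofList names, PySem.Set.ofList (pvDups names))

-- ===== PRECONDITION & SPEC =====
-- Pre_ excludes exactly the inputs where A raises IndexError: a non-empty chunk with fewer than 2
-- elements makes 'chunk[1]' raise (B raises there too).
def Pre_get_users_comments_from_chunks (chunks : List (List String)) : Prop :=
  ∀ c ∈ chunks, c ≠ [] → 2 ≤ c.length
instance (chunks : List (List String)) : Decidable (Pre_get_users_comments_from_chunks chunks) := by
  unfold Pre_get_users_comments_from_chunks; infer_instance

def pvWitness_get_users_comments_from_chunks : List (List String) :=
  [["c1", "alice", "d", "t", "l", "hi ", "there", "Reply to bob"], [],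
   ["c2", "bob", "d", "t", "l", "yo"], ["c3", "alice", "d", "t", "l"]]

def Spec_get_users_comments_from_chunks (chunks : List (List String)) (out : (List (String × List String)) × List String × List String) : Prop := out = get_users_comments_from_chunks_alt chunks
instance (chunks : List (List String)) (out : (List (String × List String)) × List String × List String) : Decidable (Spec_get_users_comments_from_chunks chunks out) := by unfold Spec_get_users_comments_from_chunks; infer_instance

-- ===== CLAIM (what is proved, stated in full; the proofs are below) =====
def Claim_equal_get_users_comments_from_chunks : Prop := ∀ (chunks : List (List String)), Dom_get_users_comments_from_chunks chunks → Pre_get_users_comments_from_chunks chunks → Spec_get_users_comments_from_chunks chunks (get_users_comments_from_chunks chunks)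

-- ===== LEMMAS AND PROOFS =====

-- A's per-chunk step, abstracted to the (username, text) pair of the chunk
def pvStepP (st : PySem.Dict String (List String) × PySem.Set String × PySem.Set String)
    (pr : String × String) : PySem.Dict String (List String) × PySem.Set String × PySem.Set String :=
  let dic := st.1
  let multi := if dic.contains pr.1 then PySem.Set.add st.2.2 pr.1 else st.2.2
  let users := PySem.Set.add st.2.1 pr.1
  let dic := (if dic.contains pr.1 then dic else dic.insert pr.1 []).modify pr.1 [] (· ++ [pr.2])
  (dic, users, multi)

def pvPair (c : List String) : String × String := (PySem.List.pyGetD c 1 "", pvCommentTextB c)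

def pvDicOf (ps : List (String × String)) : PySem.Dict String (List String) :=
  ps.foldl (fun d p => d.modify p.1 [] (· ++ [p.2])) PySem.Dict.empty

lemma pv_keys_dicOf (ps : List (String × String)) :
    (pvDicOf ps).keys = PySem.Set.ofList (ps.map (·.1)) := by
  unfold pvDicOf
  rw [PySem.Dict.keys_foldl_modify_key ps (·.1) [] (fun _ p v => v ++ [p.2]),
    PySem.Dict.keys_empty, PySem.Set.update_nil_left]

lemma pv_flatten_intersperse_nil (L : List (List Char)) :
    (List.intersperse ([] : List Char) L).flatten = L.flatten := by
  induction L with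
  | nil => rfl
  | cons x xs ih => cases xs <;> simp_all [List.intersperse]

lemma pv_join_empty_cons (s : String) (l : List String) :
    PySem.Str.join "" (s :: l) = s ++ PySem.Str.join "" l := by
  simp [PySem.Str.join, PySem.Chars.join, List.intercalate, pv_flatten_intersperse_nil,
    String.ofList_append, String.ofList_toList]

lemma pv_textA_eq (chunk : List String) : ∀ (i : Nat) (acc : String),
    pvTextA chunk i acc = acc ++ PySem.Str.join "" (pvBodyB (chunk.drop i)) := by
  intro i acc
  induction h : chunk.length - i generalizing i acc with
  | zero =>
    rw [pvTextA, dif_neg (by omega)]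
    rw [List.drop_of_length_le (by omega)]
    simp [pvBodyB, PySem.Str.join, PySem.Chars.join, List.intercalate]
  | succ n ih =>
    have hi : i < chunk.length := by omega
    rw [pvTextA, dif_pos hi, List.drop_eq_getElem_cons hi]
    by_cases hs : PySem.Str.startswith chunk[i] "Reply" = true
    · rw [if_pos hs]
      simp only [pvBodyB, if_pos hs]
      simp [PySem.Str.join, PySem.Chars.join, List.intercalate]
    · rw [if_neg hs]
      simp only [pvBodyB, if_neg hs]
      rw [ih (i + 1) _ (by omega), pv_join_empty_cons, String.append_assoc]

lemma pv_text_eq (chunk : List String) : pvTextA chunk 5 "" = pvCommentTextB chunk := by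
  rw [pvCommentTextB, PySem.List.slice_from _ (by norm_num), pv_textA_eq chunk 5 ""]
  rw [show ((5 : Int).toNat) = 5 from rfl]
  simp

-- A's chunk loop is the pair loop over the parsed records
lemma pv_chunks_to_pairs (chunks : List (List String))
    (st : PySem.Dict String (List String) × PySem.Set String × PySem.Set String) :
    chunks.foldl pvStepA st
      = ((chunks.filter (fun c => !c.isEmpty)).map pvPair).foldl pvStepP st := by
  induction chunks generalizing st with
  | nil => rfl
  | cons c rest ih =>
    by_cases hc : c = []
    · subst hc; simpa [pvStepA] using ih st
    · have hne : c.isEmpty = false := by simp [hc]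
      simp only [List.foldl_cons, List.filter_cons, hne, Bool.not_false, if_pos, List.map_cons]
      rw [ih, show pvStepA st c = pvStepP st (pvPair c) by
        simp only [pvStepA, pvStepP, pvPair, if_neg hc, pv_text_eq]]

-- the dict update of one step is a plain modify
lemma pv_dstep_eq (d : PySem.Dict String (List String)) (pr : String × String) :
    (if d.contains pr.1 then d else d.insert pr.1 []).modify pr.1 [] (· ++ [pr.2])
      = d.modify pr.1 [] (· ++ [pr.2]) := by
  by_cases h : d.contains pr.1 = true
  · rw [if_pos h]
  · have h' : d.contains pr.1 = false := by simpa using h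
    rw [if_neg h]
    simp only [PySem.Dict.modify, PySem.Dict.getD_insert_self, PySem.Dict.insert_insert_self,
      PySem.Dict.getD_of_not_contains (d := d) (d0 := ([] : List String)) h']

lemma pv_enumerate_append (xs : List String) (x : String) (s : Int) :
    PySem.List.enumerate (xs ++ [x]) s
      = PySem.List.enumerate xs s ++ [((s + xs.length : Int), x)] := by
  induction xs generalizing s with
  | nil => simp [PySem.List.enumerate]
  | cons a t ih => simp [PySem.List.enumerate, ih]; try ring

lemma pv_enumerate_bounds (xs : List String) (s : Int) :
    ∀ p ∈ PySem.List.enumerate xs s, s ≤ p.1 ∧ p.1 < s + xs.length := by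
  induction xs generalizing s with
  | nil => simp [PySem.List.enumerate]
  | cons a t ih =>
    intro p hp
    simp only [PySem.List.enumerate, List.mem_cons] at hp
    rcases hp with h | h
    · subst h
      refine ⟨le_rfl, ?_⟩
      simp only [List.length_cons]
      push_cast
      omega
    · have := ih (s + 1) p h
      simp only [List.length_cons]
      push_cast
      omega

lemma pv_dups_append (names : List String) (n : String) :
    pvDups (names ++ [n]) = pvDups names ++ (if names.contains n then [n] else []) := by
  unfold pvDups
  rw [pv_enumerate_append, List.filterMap_append]
  congr 1
  · apply List.filterMap_congr
    intro p hp
    have hb := pv_enumerate_bounds names 0 p hp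
    have h0 : (0 : Int) ≤ p.1 := hb.1
    have hlt : p.1.toNat ≤ names.length := by omega
    rw [PySem.List.slice_to _ h0, PySem.List.slice_to _ h0,
      List.take_append_of_le_length hlt]
  · simp only [List.filterMap_cons, List.filterMap_nil]
    have h0 : (0 : Int) ≤ (0 : Int) + (names.length : Int) := by positivity
    rw [PySem.List.slice_to _ h0, show ((0 : Int) + (names.length : Int)).toNat = names.length by omega,
      List.take_left]
    split_ifs <;> rfl

-- the main characterization of A's loop state
lemma pv_fold_char (ps : List (String × String)) :
    ps.foldl pvStepP (PySem.Dict.empty, PySem.Set.empty, PySem.Set.empty)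
      = (pvDicOf ps, PySem.Set.ofList (ps.map (·.1)), PySem.Set.ofList (pvDups (ps.map (·.1)))) := by
  induction ps using List.reverseRecOn with
  | nil => rfl
  | append_singleton ps p ih =>
    rw [List.foldl_append, ih, List.foldl_cons, List.foldl_nil]
    have hcont : (pvDicOf ps).contains p.1 = (ps.map (·.1)).contains p.1 := by
      rw [PySem.Dict.contains_eq_decide_mem_keys, pv_keys_dicOf]
      simp [PySem.Set.mem_ofList]
    unfold pvStepP
    dsimp only
    rw [pv_dstep_eq, hcont]
    refine Prod.ext ?_ (Prod.ext ?_ ?_)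
    · show (pvDicOf ps).modify p.1 [] (· ++ [p.2]) = pvDicOf (ps ++ [p])
      unfold pvDicOf
      rw [List.foldl_append, List.foldl_cons, List.foldl_nil]
    · show PySem.Set.add (PySem.Set.ofList (ps.map (·.1))) p.1 = PySem.Set.ofList ((ps ++ [p]).map (·.1))
      rw [List.map_append, List.map_cons, List.map_nil, PySem.Set.ofList_append_singleton]
    · show (if (ps.map (·.1)).contains p.1 then
          PySem.Set.add (PySem.Set.ofList (pvDups (ps.map (·.1)))) p.1
        else PySem.Set.ofList (pvDups (ps.map (·.1))))
        = PySem.Set.ofList (pvDups ((ps ++ [p]).map (·.1)))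
      rw [List.map_append, List.map_cons, List.map_nil, pv_dups_append]
      by_cases hm : (ps.map (·.1)).contains p.1 = true
      · rw [if_pos hm, hm, if_pos rfl, PySem.Set.ofList_append_singleton]
      · rw [if_neg hm]
        simp only [Bool.not_eq_true] at hm
        rw [hm]
        simp


-- both dicts list the same items: first-occurrence key order, per-user comment lists
lemma pv_items_eq (records : List (List String)) :
    (pvDicOf (records.map pvPair)).items
      = (PySem.Dict.ofList ((PySem.List.dedup (records.map (fun c => PySem.List.pyGetD c 1 ""))).map
          (fun u => (u, (records.filter (fun c => PySem.List.pyGetD c 1 "" == u)).map pvCommentTextB)))).items := by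
  have hnd : (pvDicOf (records.map pvPair)).keys.Nodup := by
    unfold pvDicOf
    exact PySem.Dict.nodup_keys_foldl_modify_key (records.map pvPair)
      (fun p => p.1) [] (fun _ p v => v ++ [p.2]) PySem.Dict.empty PySem.Dict.nodup_keys_empty
  rw [PySem.Dict.items_eq_map_keys _ hnd ([] : List String), pv_keys_dicOf]
  have hfst : (records.map pvPair).map (·.1) = records.map (fun c => PySem.List.pyGetD c 1 "") := by
    rw [List.map_map]; rfl
  -- right-hand side: a dict built from fresh distinct keys lists exactly its input pairs
  have hrhs : (PySem.Dict.ofList ((PySem.List.dedup (records.map (fun c => PySem.List.pyGetD c 1 ""))).map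
        (fun u => (u, (records.filter (fun c => PySem.List.pyGetD c 1 "" == u)).map pvCommentTextB)))).items
      = (PySem.List.dedup (records.map (fun c => PySem.List.pyGetD c 1 ""))).map
          (fun u => (u, (records.filter (fun c => PySem.List.pyGetD c 1 "" == u)).map pvCommentTextB)) := by
    show (PySem.Dict.empty.update _).items = _
    rw [PySem.Dict.update, List.foldl_map]
    rw [PySem.Dict.items_foldl_insert_fresh _ (fun u => u)
      (fun u => (records.filter (fun c => PySem.List.pyGetD c 1 "" == u)).map pvCommentTextB)
      PySem.Dict.empty (fun a _ => PySem.Dict.contains_empty a)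
      (by simp)]
    rfl
  rw [hrhs, hfst, PySem.List.dedup_eq_ofList]
  apply List.map_congr_left
  intro u _
  have hg : (pvDicOf (records.map pvPair)).getD u [] = ((records.map pvPair).filter (fun p => p.1 == u)).map (·.2) := by
    unfold pvDicOf
    rw [PySem.Dict.getD_foldl_modify_append, PySem.Dict.getD_empty]
    rfl
  rw [hg, List.filter_map, List.map_map]
  rfl

-- ===== VERDICT (by name: the statement is the Claim_ definition above) =====
theorem get_users_comments_from_chunks_spec : Claim_equal_get_users_comments_from_chunks := by
  intro chunks _ _
  unfold Spec_get_users_comments_from_chunks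
  unfold get_users_comments_from_chunks get_users_comments_from_chunks_alt
  rw [pv_chunks_to_pairs, pv_fold_char]
  have hnames : ((chunks.filter (fun c => !c.isEmpty)).map pvPair).map (·.1)
      = (chunks.filter (fun c => !c.isEmpty)).map (fun c => PySem.List.pyGetD c 1 "") := by
    rw [List.map_map]; rfl
  refine Prod.ext ?_ (Prod.ext ?_ ?_)
  · exact pv_items_eq (chunks.filter (fun c => !c.isEmpty))
  · show PySem.Set.ofList _ = PySem.Set.ofList _
    rw [hnames]
  · show PySem.Set.ofList _ = PySem.Set.ofList _
    rw [hnames]
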